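-- pv_equiv track=rewrite | github.com/Onyeocha-Keside/helpdesksystem | services/retriever.py | _infer_category_from_header
-- ===== SOURCE A (Python) =====
-- def _infer_category_from_header(header: str) -> str:
--     """Infer category from section header."""
--     header_lower = header.lower()
--
--     if any(word in header_lower for word in ["password", "login", "authentication"]):
--         return "password_reset"
--     elif any(word in header_lower for word in ["software", "installation", "install"]):
--         return "software_installation"
--     elif any(word in header_lower for word in ["hardware", "device", "equipment"]):
--         return "hardware_failure"
--     elif any(word in header_lower for word in ["network", "connectivity", "wifi", "vpn"]):
--         return "network_connectivity"
--     elif any(word in header_lower for word in ["email", "mail", "outlook"]):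
--         return "email_configuration"
--     elif any(word in header_lower for word in ["security", "incident", "threat"]):
--         return "security_incident"
--     else:
--         return "policy_question"
-- ===== SOURCE B (Python) =====
-- _KEYWORDS = {
--     "password": 0, "login": 0, "authentication": 0,
--     "software": 1, "installation": 1, "install": 1,
--     "hardware": 2, "device": 2, "equipment": 2,
--     "network": 3, "connectivity": 3, "wifi": 3, "vpn": 3,
--     "email": 4, "mail": 4, "outlook": 4,
--     "security": 5, "incident": 5, "threat": 5,
-- }
--
-- _CATEGORIES = [
--     "password_reset", "software_installation", "hardware_failure",
--     "network_connectivity", "email_configuration", "security_incident",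
-- ]
--
--
-- def _infer_category_from_header(header: str) -> str:
--     """Infer category from section header."""
--     h = header.lower()
--     best = len(_CATEGORIES)
--     for i in range(len(h)):
--         for kw, rank in _KEYWORDS.items():
--             if rank < best and h.startswith(kw, i):
--                 best = rank
--     return _CATEGORIES[best] if best < len(_CATEGORIES) else "policy_question"
-- ===== Notes on version B (the rewrite author's own statement) =====
-- stated objective: alternative
-- what changed: Instead of six any-substring branches, B scans the header positions once, matching a keyword-to-priority map at each position and keeping the minimum priority matched; the category is looked up from that minimum (branch order becomes numeric priority).
import Mathlib
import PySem

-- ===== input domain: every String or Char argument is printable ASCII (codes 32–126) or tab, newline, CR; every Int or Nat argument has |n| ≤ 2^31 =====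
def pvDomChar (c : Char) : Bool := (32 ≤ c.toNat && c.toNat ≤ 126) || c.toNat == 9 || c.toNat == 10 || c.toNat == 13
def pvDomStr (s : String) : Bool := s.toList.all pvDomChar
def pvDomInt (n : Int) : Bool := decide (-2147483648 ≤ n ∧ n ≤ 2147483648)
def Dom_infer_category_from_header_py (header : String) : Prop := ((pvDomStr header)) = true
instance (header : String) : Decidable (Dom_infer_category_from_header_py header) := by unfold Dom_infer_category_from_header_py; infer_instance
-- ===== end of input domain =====

-- B replaces A's six any-substring branches by one scan over the header's positions with a
-- keyword→priority map, keeping the minimum priority matched (alternative decomposition; return value only).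

-- ===== PORT A =====
def infer_category_from_header_py (header : String) : String :=
  let header_lower := PySem.Str.lower header
  if ["password", "login", "authentication"].any (fun word => PySem.Str.isIn word header_lower) then
    "password_reset"
  else if ["software", "installation", "install"].any (fun word => PySem.Str.isIn word header_lower) then
    "software_installation"
  else if ["hardware", "device", "equipment"].any (fun word => PySem.Str.isIn word header_lower) then
    "hardware_failure"
  else if ["network", "connectivity", "wifi", "vpn"].any (fun word => PySem.Str.isIn word header_lower) then
    "network_connectivity"
  else if ["email", "mail", "outlook"].any (fun word => PySem.Str.isIn word header_lower) then
    "email_configuration"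
  else if ["security", "incident", "threat"].any (fun word => PySem.Str.isIn word header_lower) then
    "security_incident"
  else
    "policy_question"

-- ===== PORT B =====
-- Python dict _KEYWORDS → association list in insertion order (iterated with .items()).
def pvKeywords : List (String × Nat) :=
  [("password", 0), ("login", 0), ("authentication", 0),
   ("software", 1), ("installation", 1), ("install", 1),
   ("hardware", 2), ("device", 2), ("equipment", 2),
   ("network", 3), ("connectivity", 3), ("wifi", 3), ("vpn", 3),
   ("email", 4), ("mail", 4), ("outlook", 4),
   ("security", 5), ("incident", 5), ("threat", 5)]

def pvCategories : List String :=
  ["password_reset", "software_installation", "hardware_failure",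
   "network_connectivity", "email_configuration", "security_incident"]

-- h.startswith(kw, i) with 0 ≤ i ≤ len(h) is exactly: kw is a prefix of h[i:]  (exact port).
-- the body of the inner for-loop: if rank < best and h.startswith(kw, i): best = rank
def pvStep (h : List Char) (i : Nat) (b : Nat) (e : String × Nat) : Nat :=
  if e.2 < b && e.1.toList.isPrefixOf (h.drop i) then e.2 else b

def infer_category_from_header_py_alt (header : String) : String :=
  let h : List Char := (PySem.Str.lower header).toList
  let best : Nat :=
    (List.range h.length).foldl (fun best i => pvKeywords.foldl (pvStep h i) best)
      pvCategories.length
  if best < pvCategories.length then pvCategories.getD best "" else "policy_question"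

-- ===== PRECONDITION & SPEC =====
def Spec_infer_category_from_header_py (header : String) (out : String) : Prop := out = infer_category_from_header_py_alt header
instance (header : String) (out : String) : Decidable (Spec_infer_category_from_header_py header out) := by unfold Spec_infer_category_from_header_py; infer_instance

-- ===== CLAIM (what is proved, stated in full; the proofs are below) =====
def Claim_equal_infer_category_from_header_py : Prop := ∀ (header : String), Dom_infer_category_from_header_py header → Spec_infer_category_from_header_py header (infer_category_from_header_py header)

-- ===== LEMMAS AND PROOFS =====

-- abbreviations used only in the proofs below
def pvOuter (h : List Char) (I : List Nat) (b : Nat) : Nat :=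
  I.foldl (fun best i => pvKeywords.foldl (pvStep h i) best) b

theorem pv_fold_le (h : List Char) (i : Nat) (L : List (String × Nat)) (b : Nat) :
    L.foldl (pvStep h i) b ≤ b := by
  induction L generalizing b with
  | nil => exact le_refl b
  | cons a t ih =>
      refine le_trans (ih _) ?_
      unfold pvStep
      split
      · simp_all; omega
      · exact le_refl b

theorem pv_fold_le_mem (h : List Char) (i : Nat) (L : List (String × Nat)) (b : Nat)
    (e : String × Nat) (hmem : e ∈ L) (hp : e.1.toList.isPrefixOf (h.drop i) = true) :
    L.foldl (pvStep h i) b ≤ e.2 := by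
  induction L generalizing b with
  | nil => cases hmem
  | cons a t ih =>
      simp only [List.foldl_cons]
      rcases List.mem_cons.mp hmem with rfl | hmem'
      · have hstep : pvStep h i b e ≤ e.2 := by
          unfold pvStep; rw [hp]; split <;> simp_all
        exact le_trans (pv_fold_le h i t _) hstep
      · exact ih _ hmem'

theorem pv_fold_cases (h : List Char) (i : Nat) (L : List (String × Nat)) (b : Nat) :
    (L.foldl (pvStep h i) b = b) ∨
    (∃ e ∈ L, e.1.toList.isPrefixOf (h.drop i) = true ∧ L.foldl (pvStep h i) b = e.2) := by
  induction L generalizing b with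
  | nil => exact Or.inl rfl
  | cons a t ih =>
      simp only [List.foldl_cons]
      by_cases hc : (a.2 < b && a.1.toList.isPrefixOf (h.drop i)) = true
      · have hs : pvStep h i b a = a.2 := by unfold pvStep; rw [if_pos hc]
        have hp : a.1.toList.isPrefixOf (h.drop i) = true := by
          simp only [Bool.and_eq_true] at hc; exact hc.2
        rw [hs]
        rcases ih a.2 with h1 | ⟨e, he, hpe, hval⟩
        · exact Or.inr ⟨a, List.mem_cons_self .., hp, h1⟩
        · exact Or.inr ⟨e, List.mem_cons_of_mem _ he, hpe, hval⟩
      · have hs : pvStep h i b a = b := by unfold pvStep; rw [if_neg hc]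
        rw [hs]
        rcases ih b with h1 | ⟨e, he, hpe, hval⟩
        · exact Or.inl h1
        · exact Or.inr ⟨e, List.mem_cons_of_mem _ he, hpe, hval⟩

theorem pv_outer_le (h : List Char) (I : List Nat) (b : Nat) : pvOuter h I b ≤ b := by
  induction I generalizing b with
  | nil => exact le_refl b
  | cons i t ih =>
      simp only [pvOuter, List.foldl_cons] at ih ⊢
      exact le_trans (ih (pvKeywords.foldl (pvStep h i) b)) (pv_fold_le h i pvKeywords b)

theorem pv_outer_le_mem (h : List Char) (I : List Nat) (b : Nat) (i : Nat) (hi : i ∈ I)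
    (e : String × Nat) (hmem : e ∈ pvKeywords) (hp : e.1.toList.isPrefixOf (h.drop i) = true) :
    pvOuter h I b ≤ e.2 := by
  induction I generalizing b with
  | nil => cases hi
  | cons j t ih =>
      simp only [pvOuter, List.foldl_cons] at ih ⊢
      rcases List.mem_cons.mp hi with rfl | hi'
      · have h1 : pvOuter h t (pvKeywords.foldl (pvStep h i) b) ≤ pvKeywords.foldl (pvStep h i) b :=
          pv_outer_le h t _
        simp only [pvOuter] at h1
        exact le_trans h1 (pv_fold_le_mem h i pvKeywords b e hmem hp)
      · exact ih (pvKeywords.foldl (pvStep h j) b) hi'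

theorem pv_outer_cases (h : List Char) (I : List Nat) (b : Nat) :
    pvOuter h I b = b ∨
    ∃ i ∈ I, ∃ e ∈ pvKeywords, e.1.toList.isPrefixOf (h.drop i) = true ∧ pvOuter h I b = e.2 := by
  induction I generalizing b with
  | nil => exact Or.inl rfl
  | cons j t ih =>
      simp only [pvOuter, List.foldl_cons] at ih ⊢
      rcases ih (pvKeywords.foldl (pvStep h j) b) with h2 | ⟨i, hi, e, he, hp, hval⟩
      · rcases pv_fold_cases h j pvKeywords b with h1 | ⟨e, he, hp, hval⟩
        · exact Or.inl (by rw [h2]; exact h1)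
        · exact Or.inr ⟨j, List.mem_cons_self .., e, he, hp, by rw [h2]; exact hval⟩
      · exact Or.inr ⟨i, List.mem_cons_of_mem _ hi, e, he, hp, hval⟩

-- isIn on strings ↔ some in-range position where the (nonempty) keyword is a prefix of the drop
theorem pv_isIn_iff (w : String) (hw : w.toList ≠ []) (s : List Char) :
    PySem.Chars.isIn w.toList s = true ↔
    ∃ i ∈ List.range s.length, w.toList.isPrefixOf (s.drop i) = true := by
  constructor
  · intro h2
    rcases (PySem.Chars.exists_prefix_drop_iff_isIn (sub := w.toList) (s := s)).mpr h2 with ⟨j, hj⟩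
    by_cases hjl : j < s.length
    · exact ⟨j, List.mem_range.mpr hjl, List.isPrefixOf_iff_prefix.mpr hj⟩
    · exfalso
      have hnil : s.drop j = [] := List.drop_eq_nil_of_le (by omega)
      rw [hnil] at hj
      exact hw (List.prefix_nil.mp hj)
  · rintro ⟨i, _, hp⟩
    exact (PySem.Chars.exists_prefix_drop_iff_isIn (sub := w.toList) (s := s)).mp
      ⟨i, List.isPrefixOf_iff_prefix.mp hp⟩

-- upper bound: a keyword of rank r occurring in hl bounds the scan's minimum by r
theorem pv_le_of_isIn (hl : String) (w : String) (r : Nat)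
    (hmem : (w, r) ∈ pvKeywords) (hw : w.toList ≠ [])
    (hin : PySem.Str.isIn w hl = true) :
    pvOuter hl.toList (List.range hl.toList.length) 6 ≤ r := by
  have hch : PySem.Chars.isIn w.toList hl.toList = true := by
    rw [PySem.Str.isIn_iff_infix] at hin
    exact (PySem.Chars.isIn_iff_infix _ _).mpr hin
  rcases (pv_isIn_iff w hw hl.toList).mp hch with ⟨i, hi, hp⟩
  exact pv_outer_le_mem hl.toList (List.range hl.toList.length) 6 i hi (w, r) hmem hp

-- the scan's result is 6 or the rank of a keyword that occurs in hl
theorem pv_cases_isIn (hl : String) :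
    pvOuter hl.toList (List.range hl.toList.length) 6 = 6 ∨
    ∃ e ∈ pvKeywords, PySem.Str.isIn e.1 hl = true ∧
      pvOuter hl.toList (List.range hl.toList.length) 6 = e.2 := by
  rcases pv_outer_cases hl.toList (List.range hl.toList.length) 6 with h6 | ⟨i, _, e, he, hp, hval⟩
  · exact Or.inl h6
  · refine Or.inr ⟨e, he, ?_, hval⟩
    have hch : PySem.Chars.isIn e.1.toList hl.toList = true :=
      (PySem.Chars.exists_prefix_drop_iff_isIn (sub := e.1.toList) (s := hl.toList)).mp
        ⟨i, List.isPrefixOf_iff_prefix.mp hp⟩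
    rw [PySem.Str.isIn_iff_infix]
    exact (PySem.Chars.isIn_iff_infix _ _).mp hch

-- lower bound: if no keyword of rank < g occurs, the scan's minimum is at least g
theorem pv_lb (hl : String) (g : Nat) (hg : g ≤ 6)
    (hf : ∀ e ∈ pvKeywords, e.2 < g → PySem.Str.isIn e.1 hl = false) :
    g ≤ pvOuter hl.toList (List.range hl.toList.length) 6 := by
  rcases pv_cases_isIn hl with h6 | ⟨e, he, hin, hval⟩
  · omega
  · by_contra hlt
    have : e.2 < g := by omega
    rw [hf e he this] at hin
    cases hin

-- ===== VERDICT (by name: the statement is the Claim_ definition above) =====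
theorem infer_category_from_header_py_spec : Claim_equal_infer_category_from_header_py := by
  intro header _
  unfold Spec_infer_category_from_header_py
  have halt : infer_category_from_header_py_alt header =
      (if pvOuter (PySem.Str.lower header).toList
            (List.range (PySem.Str.lower header).toList.length) 6 < 6
       then pvCategories.getD (pvOuter (PySem.Str.lower header).toList
            (List.range (PySem.Str.lower header).toList.length) 6) ""
       else "policy_question") := rfl
  rw [halt]
  unfold infer_category_from_header_py
  set hl := PySem.Str.lower header with hhl
  set m := pvOuter hl.toList (List.range hl.toList.length) 6 with hmdef
  have hm6 : m ≤ 6 := pv_outer_le hl.toList (List.range hl.toList.length) 6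
  by_cases c0 : (["password", "login", "authentication"].any (fun word => PySem.Str.isIn word hl)) = true
  · rw [if_pos c0]
    have hub : m ≤ 0 := by
      simp only [List.any_cons, List.any_nil, Bool.or_eq_true, Bool.or_false] at c0
      rcases c0 with h | h | h
      · exact pv_le_of_isIn hl _ 0 (by decide) (by decide) h
      · exact pv_le_of_isIn hl _ 0 (by decide) (by decide) h
      · exact pv_le_of_isIn hl _ 0 (by decide) (by decide) h
    have : m = 0 := by omega
    rw [this]
    rfl
  · rw [if_neg c0]
    simp only [List.any_cons, List.any_nil, Bool.or_eq_true, Bool.or_false, not_or,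
      Bool.not_eq_true] at c0
    by_cases c1 : (["software", "installation", "install"].any (fun word => PySem.Str.isIn word hl)) = true
    · rw [if_pos c1]
      have hub : m ≤ 1 := by
        simp only [List.any_cons, List.any_nil, Bool.or_eq_true, Bool.or_false] at c1
        rcases c1 with h | h | h
        · exact pv_le_of_isIn hl _ 1 (by decide) (by decide) h
        · exact pv_le_of_isIn hl _ 1 (by decide) (by decide) h
        · exact pv_le_of_isIn hl _ 1 (by decide) (by decide) h
      have hlb : 1 ≤ m := by
        refine pv_lb hl 1 (by omega) ?_
        intro e he hr
        simp only [pvKeywords, List.mem_cons, List.not_mem_nil, or_false] at he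
        rcases he with rfl|rfl|rfl|rfl|rfl|rfl|rfl|rfl|rfl|rfl|rfl|rfl|rfl|rfl|rfl|rfl|rfl|rfl|rfl <;>
          simp_all
      have : m = 1 := by omega
      rw [this]
      rfl
    · rw [if_neg c1]
      simp only [List.any_cons, List.any_nil, Bool.or_eq_true, Bool.or_false, not_or,
        Bool.not_eq_true] at c1
      by_cases c2 : (["hardware", "device", "equipment"].any (fun word => PySem.Str.isIn word hl)) = true
      · rw [if_pos c2]
        have hub : m ≤ 2 := by
          simp only [List.any_cons, List.any_nil, Bool.or_eq_true, Bool.or_false] at c2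
          rcases c2 with h | h | h
          · exact pv_le_of_isIn hl _ 2 (by decide) (by decide) h
          · exact pv_le_of_isIn hl _ 2 (by decide) (by decide) h
          · exact pv_le_of_isIn hl _ 2 (by decide) (by decide) h
        have hlb : 2 ≤ m := by
          refine pv_lb hl 2 (by omega) ?_
          intro e he hr
          simp only [pvKeywords, List.mem_cons, List.not_mem_nil, or_false] at he
          rcases he with rfl|rfl|rfl|rfl|rfl|rfl|rfl|rfl|rfl|rfl|rfl|rfl|rfl|rfl|rfl|rfl|rfl|rfl|rfl <;>
            simp_all
        have : m = 2 := by omega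
        rw [this]
        rfl
      · rw [if_neg c2]
        simp only [List.any_cons, List.any_nil, Bool.or_eq_true, Bool.or_false, not_or,
          Bool.not_eq_true] at c2
        by_cases c3 : (["network", "connectivity", "wifi", "vpn"].any (fun word => PySem.Str.isIn word hl)) = true
        · rw [if_pos c3]
          have hub : m ≤ 3 := by
            simp only [List.any_cons, List.any_nil, Bool.or_eq_true, Bool.or_false] at c3
            rcases c3 with h | h | h | h
            · exact pv_le_of_isIn hl _ 3 (by decide) (by decide) h
            · exact pv_le_of_isIn hl _ 3 (by decide) (by decide) h
            · exact pv_le_of_isIn hl _ 3 (by decide) (by decide) h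
            · exact pv_le_of_isIn hl _ 3 (by decide) (by decide) h
          have hlb : 3 ≤ m := by
            refine pv_lb hl 3 (by omega) ?_
            intro e he hr
            simp only [pvKeywords, List.mem_cons, List.not_mem_nil, or_false] at he
            rcases he with rfl|rfl|rfl|rfl|rfl|rfl|rfl|rfl|rfl|rfl|rfl|rfl|rfl|rfl|rfl|rfl|rfl|rfl|rfl <;>
              simp_all
          have : m = 3 := by omega
          rw [this]
          rfl
        · rw [if_neg c3]
          simp only [List.any_cons, List.any_nil, Bool.or_eq_true, Bool.or_false, not_or,
            Bool.not_eq_true] at c3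
          by_cases c4 : (["email", "mail", "outlook"].any (fun word => PySem.Str.isIn word hl)) = true
          · rw [if_pos c4]
            have hub : m ≤ 4 := by
              simp only [List.any_cons, List.any_nil, Bool.or_eq_true, Bool.or_false] at c4
              rcases c4 with h | h | h
              · exact pv_le_of_isIn hl _ 4 (by decide) (by decide) h
              · exact pv_le_of_isIn hl _ 4 (by decide) (by decide) h
              · exact pv_le_of_isIn hl _ 4 (by decide) (by decide) h
            have hlb : 4 ≤ m := by
              refine pv_lb hl 4 (by omega) ?_
              intro e he hr
              simp only [pvKeywords, List.mem_cons, List.not_mem_nil, or_false] at he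
              rcases he with rfl|rfl|rfl|rfl|rfl|rfl|rfl|rfl|rfl|rfl|rfl|rfl|rfl|rfl|rfl|rfl|rfl|rfl|rfl <;>
                simp_all
            have : m = 4 := by omega
            rw [this]
            rfl
          · rw [if_neg c4]
            simp only [List.any_cons, List.any_nil, Bool.or_eq_true, Bool.or_false, not_or,
              Bool.not_eq_true] at c4
            by_cases c5 : (["security", "incident", "threat"].any (fun word => PySem.Str.isIn word hl)) = true
            · rw [if_pos c5]
              have hub : m ≤ 5 := by
                simp only [List.any_cons, List.any_nil, Bool.or_eq_true, Bool.or_false] at c5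
                rcases c5 with h | h | h
                · exact pv_le_of_isIn hl _ 5 (by decide) (by decide) h
                · exact pv_le_of_isIn hl _ 5 (by decide) (by decide) h
                · exact pv_le_of_isIn hl _ 5 (by decide) (by decide) h
              have hlb : 5 ≤ m := by
                refine pv_lb hl 5 (by omega) ?_
                intro e he hr
                simp only [pvKeywords, List.mem_cons, List.not_mem_nil, or_false] at he
                rcases he with rfl|rfl|rfl|rfl|rfl|rfl|rfl|rfl|rfl|rfl|rfl|rfl|rfl|rfl|rfl|rfl|rfl|rfl|rfl <;>
                  simp_all
              have : m = 5 := by omega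
              rw [this]
              rfl
            · rw [if_neg c5]
              simp only [List.any_cons, List.any_nil, Bool.or_eq_true, Bool.or_false, not_or,
                Bool.not_eq_true] at c5
              have hlb : 6 ≤ m := by
                refine pv_lb hl 6 (by omega) ?_
                intro e he hr
                simp only [pvKeywords, List.mem_cons, List.not_mem_nil, or_false] at he
                rcases he with rfl|rfl|rfl|rfl|rfl|rfl|rfl|rfl|rfl|rfl|rfl|rfl|rfl|rfl|rfl|rfl|rfl|rfl|rfl <;>
                  simp_all
              have : m = 6 := by omega
              rw [this]
              rfl
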